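-- pv_equiv track=rewrite | github.com/hwan-koo/Algorithm | 프로그래머스/2/84512. 모음 사전/모음 사전.py | solution
-- ===== SOURCE A (Python) =====
-- def solution(word):
--     data = []
--     def diction(data, s, depth):
--         if depth == 6:
--             return
--         if s != "":
--             data.append(s)
--         for i in ["A", "E", "I", "O", "U"]:
--             diction(data, s + i, depth + 1)
--
--     diction(data, "", 0)
--
--     answer = data.index(word) + 1
--     return answer
-- ===== SOURCE B (Python) =====
-- def solution(word):
--     # Closed-form rank: char at position i contributes index*weight[i] + 1.
--     if not 1 <= len(word) <= 5:
--         raise ValueError(f"{word!r} is not in the AEIOU dictionary")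
--     weights = [781, 156, 31, 6, 1]
--     return sum("AEIOU".index(c) * weights[i] + 1 for i, c in enumerate(word))
-- ===== Notes on version B (the rewrite author's own statement) =====
-- stated objective: faster
-- what changed: B replaces A's recursive enumeration of all 3905 dictionary words followed by a linear list.index scan with a closed-form positional rank: sum of AEIOU-index times the fixed weight [781,156,31,6,1] plus 1 per character.
import Mathlib
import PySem

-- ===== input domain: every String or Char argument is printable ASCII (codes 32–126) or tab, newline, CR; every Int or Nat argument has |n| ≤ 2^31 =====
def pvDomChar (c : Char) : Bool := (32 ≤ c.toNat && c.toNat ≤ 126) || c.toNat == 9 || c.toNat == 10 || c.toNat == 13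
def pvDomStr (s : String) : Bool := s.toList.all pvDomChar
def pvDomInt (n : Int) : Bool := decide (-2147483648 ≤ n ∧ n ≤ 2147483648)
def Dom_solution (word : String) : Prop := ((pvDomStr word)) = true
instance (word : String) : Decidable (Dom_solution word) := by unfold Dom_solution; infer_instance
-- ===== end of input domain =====

-- B replaces A's enumeration of all 3905 dictionary words with the positional
-- closed form Σ idx(cᵢ)·weightᵢ + 1 (objective: faster by a constant factor).

-- ===== PORT A =====
-- diction(data, s, depth): fuel = 6 - depth (depth == 6 ↔ fuel = 0); the for-loop's
-- successive appends to `data` are the flatten of the per-vowel recursive lists.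
def solutionDiction (s : List Char) (fuel : Nat) : List (List Char) :=
  match fuel with
  | 0 => []
  | k + 1 =>
      (if s ≠ [] then [s] else []) ++
      ((['A', 'E', 'I', 'O', 'U'].map (fun i => solutionDiction (s ++ [i]) k)).flatten)

def solution (word : String) : Int :=
  match PySem.List.index? (solutionDiction [] 6) word.toList with
  | some i => (i : Int) + 1
  | none => 0  -- data.index(word) raises ValueError here; excluded by Pre_solution

-- ===== PORT B =====
def solution_alt (word : String) : Int :=
  if 1 ≤ PySem.Str.len word ∧ PySem.Str.len word ≤ 5 then
    (PySem.List.enumerate word.toList 0).foldl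
      (fun acc p =>
        acc + ((PySem.List.index? ['A', 'E', 'I', 'O', 'U'] p.2).getD 0 : Int)
                * PySem.List.pyGetD ([781, 156, 31, 6, 1] : List Int) p.1 0
            + 1) 0
  else 0  -- B raises ValueError here; excluded by Pre_solution

-- ===== PRECONDITION & SPEC =====
-- Pre_: exactly the inputs where A returns (word is one of the 3905 dictionary
-- words); on all others both A and B raise ValueError.
def Pre_solution (word : String) : Prop :=
  word.toList ≠ [] ∧ word.toList.length ≤ 5 ∧
    word.toList.all
      (fun c => c == 'A' || c == 'E' || c == 'I' || c == 'O' || c == 'U') = true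
instance (word : String) : Decidable (Pre_solution word) := by
  unfold Pre_solution; infer_instance

def pvWitness_solution : String := "AEU"

def Spec_solution (word : String) (out : Int) : Prop := out = solution_alt word
instance (word : String) (out : Int) : Decidable (Spec_solution word out) := by
  unfold Spec_solution; infer_instance

-- ===== CLAIM (what is proved, stated in full; the proofs are below) =====
def Claim_equal_solution : Prop :=
  ∀ (word : String), Dom_solution word → Pre_solution word →
    Spec_solution word (solution word)

-- ===== LEMMAS AND PROOFS =====

-- block size of the dictionary below a node with `fuel` levels remaining
def pvT : Nat → Nat
  | 0 => 0
  | k + 1 => 1 + 5 * pvT k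

-- rank (0-based) of s ++ suffix within solutionDiction s fuel, past the head entry
def pvRank : List Char → Nat → Nat
  | [], _ => 0
  | c :: rest, fuel =>
      (PySem.List.index? (['A', 'E', 'I', 'O', 'U'] : List Char) c).getD 0 * pvT (fuel - 1)
        + (if rest = [] then 0 else 1 + pvRank rest (fuel - 1))

lemma pv_index?_append {α : Type} [BEq α] [LawfulBEq α] (l t : List α) (v : α)
    (h : v ∉ l) :
    PySem.List.index? (l ++ t) v = (PySem.List.index? t v).map (· + l.length) := by
  induction l with
  | nil => simp [Option.map_id']
  | cons x xs ih =>
      simp only [List.mem_cons, not_or] at h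
      rw [List.cons_append,
        PySem.List.index?_cons_of_ne (xs ++ t) (fun hv => h.1 hv.symm),
        ih h.2, Option.map_map]
      simp [Function.comp_def, List.length_cons, Nat.add_assoc]

lemma pv_prefix_diction :
    ∀ (fuel : Nat) (s w : List Char), w ∈ solutionDiction s fuel → s <+: w := by
  intro fuel
  induction fuel with
  | zero => intro s w hw; simp [solutionDiction] at hw
  | succ k ih =>
      intro s w hw
      simp only [solutionDiction, List.mem_append, List.mem_flatten, List.mem_map] at hw
      rcases hw with hw | ⟨L, ⟨i, hi, rfl⟩, hwL⟩
      · rcases hw with hw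
        have : w = s := by split at hw <;> simp_all
        exact this ▸ List.prefix_refl _
      · exact (List.prefix_append s [i]).trans (ih _ _ hwL)

lemma pv_len_diction :
    ∀ (fuel : Nat) (s : List Char), s ≠ [] →
      (solutionDiction s fuel).length = pvT fuel := by
  intro fuel
  induction fuel with
  | zero => intro s _; simp [solutionDiction, pvT]
  | succ k ih =>
      intro s hs
      have h := fun (i : Char) => ih (s ++ [i]) (by simp)
      simp [solutionDiction, hs, pvT, h]
      ring

lemma pv_blocks (vs : List Char) (s : List Char) (k : Nat) (c : Char)
    (rest : List Char) (inner : Nat) (hc : c ∈ vs)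
    (hinner : PySem.List.index? (solutionDiction (s ++ [c]) k) (s ++ c :: rest)
        = some inner) :
    PySem.List.index? ((vs.map (fun i => solutionDiction (s ++ [i]) k)).flatten)
        (s ++ c :: rest)
      = some ((PySem.List.index? vs c).getD 0 * pvT k + inner) := by
  induction vs with
  | nil => cases hc
  | cons i vs' ih =>
      by_cases hic : i = c
      · subst hic
        rw [List.map_cons, List.flatten_cons]
        have hmem : (s ++ i :: rest) ∈ solutionDiction (s ++ [i]) k :=
          (PySem.List.index?_isSome_iff _ _).mp (by rw [hinner]; rfl)
        rw [PySem.List.index?_append_of_mem _ hmem, hinner,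
          PySem.List.index?_cons_self]
        simp
      · have hc' : c ∈ vs' := (List.mem_cons.mp hc).resolve_left (fun e => hic e.symm)
        obtain ⟨j, hj⟩ : ∃ j, PySem.List.index? vs' c = some j :=
          Option.isSome_iff_exists.mp ((PySem.List.index?_isSome_iff _ _).mpr hc')
        have hnot : (s ++ c :: rest) ∉ solutionDiction (s ++ [i]) k := by
          intro hmem
          have hpre : [i] <+: c :: rest :=
            (List.prefix_append_right_inj s).mp (pv_prefix_diction k (s ++ [i]) _ hmem)
          rcases hpre with ⟨t, ht⟩
          rw [List.singleton_append, List.cons_eq_cons] at ht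
          exact hic ht.1
        rw [List.map_cons, List.flatten_cons,
          pv_index?_append _ _ _ hnot, ih hc',
          pv_len_diction k (s ++ [i]) (by simp),
          PySem.List.index?_cons_of_ne vs' hic, hj]
        simp only [Option.map_some, Option.getD_some]
        congr 1
        ring

lemma pv_main :
    ∀ (suffix s : List Char) (fuel : Nat), suffix ≠ [] →
      suffix.length + 1 ≤ fuel →
      (∀ c ∈ suffix, c ∈ (['A', 'E', 'I', 'O', 'U'] : List Char)) →
      PySem.List.index? (solutionDiction s fuel) (s ++ suffix)
        = some ((if s = [] then 0 else 1) + pvRank suffix fuel) := by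
  intro suffix
  induction suffix with
  | nil => intro _ _ h; exact absurd rfl h
  | cons c rest ih =>
      intro s fuel _ hlen hvow
      simp only [List.length_cons] at hlen
      obtain ⟨k, rfl⟩ : ∃ k, fuel = k + 1 := ⟨fuel - 1, by omega⟩
      have hinner : PySem.List.index? (solutionDiction (s ++ [c]) k) (s ++ c :: rest)
          = some (if rest = [] then 0 else 1 + pvRank rest k) := by
        by_cases hrest : rest = []
        · subst hrest
          obtain ⟨k', rfl⟩ : ∃ k', k = k' + 1 := ⟨k - 1, by omega⟩
          show PySem.List.index? (solutionDiction (s ++ [c]) (k' + 1)) (s ++ [c]) = _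
          simp only [solutionDiction, if_pos (by simp : s ++ [c] ≠ []),
            List.singleton_append]
          rw [PySem.List.index?_cons_self]
          simp
        · have hih := ih (s ++ [c]) k hrest (by simp at hlen ⊢; omega)
            (fun x hx => hvow x (by simp [hx]))
          rw [List.append_assoc, List.singleton_append] at hih
          rw [hih]
          simp [hrest]
      have hblocks := pv_blocks ['A', 'E', 'I', 'O', 'U'] s k c rest _
        (hvow c (by simp)) hinner
      simp only [solutionDiction]
      have hhead : (s ++ c :: rest) ∉ (if s ≠ [] then [s] else []) := by
        split
        · intro h
          rw [List.mem_singleton] at h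
          have := congrArg List.length h; simp at this
        · simp
      rw [pv_index?_append _ _ _ hhead, hblocks]
      by_cases hs : s = []
      · subst hs
        simp [pvRank]
      · simp only [ne_eq, not_false_eq_true, if_true, eq_false hs, if_false,
          List.length_cons, List.length_nil, Option.map_some]
        simp only [pvRank, Nat.add_sub_cancel]
        congr 1
        ring

-- B-side: the fold over enumerate as a recursive sum
def pvH : List Char → Nat → Int
  | [], _ => 0
  | c :: rest, i =>
      ((PySem.List.index? (['A', 'E', 'I', 'O', 'U'] : List Char) c).getD 0 : Int)
          * PySem.List.pyGetD ([781, 156, 31, 6, 1] : List Int) (i : Int) 0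
        + 1 + pvH rest (i + 1)

lemma pv_foldB :
    ∀ (l : List Char) (i : Nat) (acc : Int),
      (PySem.List.enumerate l (i : Int)).foldl
        (fun acc p =>
          acc + ((PySem.List.index? (['A', 'E', 'I', 'O', 'U'] : List Char) p.2).getD 0 : Int)
                  * PySem.List.pyGetD ([781, 156, 31, 6, 1] : List Int) p.1 0
              + 1) acc
        = acc + pvH l i := by
  intro l
  induction l with
  | nil => intro i acc; simp [PySem.List.enumerate_nil, pvH]
  | cons c rest ih =>
      intro i acc
      rw [PySem.List.enumerate_cons, List.foldl_cons]
      have : (i : Int) + 1 = ((i + 1 : Nat) : Int) := by push_cast; ring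
      rw [this, ih]
      simp [pvH]; ring

lemma pv_weights (i : Nat) (hi : i ≤ 4) :
    PySem.List.pyGetD ([781, 156, 31, 6, 1] : List Int) (i : Int) 0
      = (pvT (5 - i) : Int) := by
  interval_cases i <;> decide

lemma pv_bridge :
    ∀ (l : List Char) (i : Nat), l ≠ [] → i + l.length ≤ 5 →
      pvH l i = (pvRank l (6 - i) : Int) + 1 := by
  intro l
  induction l with
  | nil => intro _ h; exact absurd rfl h
  | cons c rest ih =>
      intro i _ hlen
      simp only [List.length_cons] at hlen
      rw [pvH, pv_weights i (by omega)]
      by_cases hrest : rest = []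
      · subst hrest
        simp only [pvH]
        rw [pvRank]
        have : 6 - i - 1 = 5 - i := by omega
        rw [this]
        push_cast
        norm_num
      · rw [ih (i + 1) hrest (by omega)]
        rw [pvRank]
        simp only [if_neg hrest]
        have h1 : 6 - i - 1 = 5 - i := by omega
        have h2 : 6 - (i + 1) = 5 - i := by omega
        rw [h1, h2]
        push_cast; ring

-- ===== VERDICT (by name: the statement is the Claim_ definition above) =====
theorem solution_spec : Claim_equal_solution := by
  intro word _ hpre
  obtain ⟨hne, hlen, hvow'⟩ := hpre
  have hvow : ∀ c ∈ word.toList, c ∈ (['A', 'E', 'I', 'O', 'U'] : List Char) := by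
    intro c hc
    have h := List.all_eq_true.mp hvow' c hc
    simp only [Bool.or_eq_true, beq_iff_eq] at h
    rcases h with (((h | h) | h) | h) | h <;> simp [h]
  unfold Spec_solution solution solution_alt
  have hmain : PySem.List.index? (solutionDiction [] 6) word.toList
      = some (pvRank word.toList 6) := by
    have h := pv_main word.toList [] 6 hne (by omega) hvow
    rw [List.nil_append] at h
    rw [h]
    norm_num
  rw [hmain]
  have hlenw : PySem.Str.len word = (word.toList.length : Int) := PySem.Str.len_eq word
  have h1 : 1 ≤ word.toList.length := by
    cases h : word.toList with
    | nil => exact absurd h hne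
    | cons a l => simp
  rw [if_pos (by rw [hlenw]; exact ⟨by exact_mod_cast h1, by exact_mod_cast hlen⟩)]
  have hf := pv_foldB word.toList 0 0
  simp only [Nat.cast_zero] at hf
  rw [hf, pv_bridge word.toList 0 hne (by omega), zero_add]
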